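-- pv_equiv track=rewrite | github.com/kshitijsanghvi/leetcode | 1807-evaluate-the-bracket-pairs-of-a-string/1807-evaluate-the-bracket-pairs-of-a-string.py | evaluate
-- ===== SOURCE A (Python) =====
-- from typing import List
--
-- def evaluate(s: str, knowledge: List[List[str]]) -> str:
--     d = {}
--     for i in knowledge:
--         d[i[0]] = i[1]
--
--     i = 0
--     n = len(s)
--     ans = ""
--     while i < n:
--         if s[i] != '(':
--             ans+=s[i]
--             i+=1
--         else:
--             j = i + 1
--             key = ""
--             while j < n and s[j] != ')':
--                 key+=s[j]
--                 j+=1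
--
--             value = '?' if key not in d else d[key]
--             ans += value
--             i = j +1
--     return ans
-- ===== SOURCE B (Python) =====
-- def evaluate(s, knowledge):
--     d = {p[0]: p[1] for p in knowledge}
--     out = []
--     while s:
--         pre, paren, rest = s.partition('(')
--         out.append(pre)
--         if not paren:
--             break
--         key, close, s = rest.partition(')')
--         out.append(d.get(key, '?'))
--     return ''.join(out)
-- ===== Notes on version B (the rewrite author's own statement) =====
-- stated objective: faster
-- what changed: Replaces the per-character index/while scan that builds the answer by repeated string concatenation with a chunk loop using str.partition to cut off each '(...)' segment at once, collecting pieces in a list joined at the end (avoids quadratic concatenation).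
import Mathlib
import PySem

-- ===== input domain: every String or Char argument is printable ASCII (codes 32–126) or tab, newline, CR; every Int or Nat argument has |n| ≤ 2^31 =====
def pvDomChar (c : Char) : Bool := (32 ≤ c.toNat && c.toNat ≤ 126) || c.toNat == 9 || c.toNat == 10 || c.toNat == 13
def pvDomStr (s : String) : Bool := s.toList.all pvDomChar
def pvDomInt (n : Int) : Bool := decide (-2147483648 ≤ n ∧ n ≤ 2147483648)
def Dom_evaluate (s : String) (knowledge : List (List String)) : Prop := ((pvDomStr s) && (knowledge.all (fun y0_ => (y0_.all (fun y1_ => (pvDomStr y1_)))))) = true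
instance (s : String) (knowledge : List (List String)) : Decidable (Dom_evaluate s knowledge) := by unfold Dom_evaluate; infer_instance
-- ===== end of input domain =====

-- One honest line: B replaces A's per-character while-loop scan with a partition-based
-- chunk loop (idiomatic; collects pieces and joins); return values proved equal on Pre_.

-- ===== PORT A =====
-- d[i[0]] = i[1] for each i in knowledge (forward, overwrite)
def evalBuildA : List (List String) → PySem.Dict String String → PySem.Dict String String
  | [], d => d
  | p :: rest, d => evalBuildA rest (d.insert (p.getD 0 "") (p.getD 1 ""))

-- the inner while: scan from s[i+1] up to ')' or end, returning (key, rest after the ')')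
def evalInnerA : List Char → List Char × List Char
  | [] => ([], [])
  | c :: t =>
    if c = ')' then ([], t)
    else ((c :: (evalInnerA t).1), (evalInnerA t).2)

theorem evalInnerA_len_le : ∀ t : List Char, (evalInnerA t).2.length ≤ t.length := by
  intro t; induction t with
  | nil => simp [evalInnerA]
  | cons c t ih =>
    by_cases h : c = ')'
    · simp [evalInnerA, h]
    · simp [evalInnerA, h]; omega

-- the outer while over the characters of s, accumulating ans
def evalLoopA (d : PySem.Dict String String) : List Char → List Char
  | [] => []
  | c :: t =>
    if c ≠ '(' then c :: evalLoopA d t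
    else
      (if ¬ d.contains (String.ofList (evalInnerA t).1) then "?"
       else d.getD (String.ofList (evalInnerA t).1) "?").toList
        ++ evalLoopA d (evalInnerA t).2
termination_by cs => cs.length
decreasing_by
  all_goals simp
  have := evalInnerA_len_le t; omega

def evaluate (s : String) (knowledge : List (List String)) : String :=
  String.ofList (evalLoopA (evalBuildA knowledge PySem.Dict.empty) s.toList)

-- ===== PORT B =====
-- d = {p[0]: p[1] for p in knowledge}
def evalBuildB (knowledge : List (List String)) : PySem.Dict String String :=
  knowledge.foldl (fun d p => d.insert (p.getD 0 "") (p.getD 1 "")) PySem.Dict.empty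

-- while s: pre, paren, rest = s.partition('('); out.append(pre); if not paren: break;
--          key, close, s = rest.partition(')'); out.append(d.get(key, '?'))
-- (s.partition(c) is ported exactly as takeWhile (· ≠ c) / dropWhile (· ≠ c):
--  the part before the first c, then the part from the first c on; tail steps past it)
def evalLoopB (d : PySem.Dict String String) : List Char → List Char
  | [] => []
  | c :: t =>
    if ((c :: t).dropWhile (· ≠ '(')).isEmpty then
      (c :: t).takeWhile (· ≠ '(')
    else
      if ((((c :: t).dropWhile (· ≠ '(')).tail).dropWhile (· ≠ ')')).isEmpty then
        (c :: t).takeWhile (· ≠ '(')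
          ++ (d.getD (String.ofList ((((c :: t).dropWhile (· ≠ '(')).tail).takeWhile (· ≠ ')'))) "?").toList
      else
        (c :: t).takeWhile (· ≠ '(')
          ++ (d.getD (String.ofList ((((c :: t).dropWhile (· ≠ '(')).tail).takeWhile (· ≠ ')'))) "?").toList
          ++ evalLoopB d ((((c :: t).dropWhile (· ≠ '(')).tail).dropWhile (· ≠ ')')).tail
termination_by cs => cs.length
decreasing_by
  have h1 : ((c :: t).dropWhile (· ≠ '(')).length ≤ t.length + 1 := by
    simpa using (List.dropWhile_sublist (l := c :: t) (p := (· ≠ '('))).length_le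
  have h2 : ((((c :: t).dropWhile (· ≠ '(')).tail).dropWhile (· ≠ ')')).length
      ≤ (((c :: t).dropWhile (· ≠ '(')).tail).length :=
    (List.dropWhile_sublist _).length_le
  simp [List.length_tail] at *
  omega

def evaluate_alt (s : String) (knowledge : List (List String)) : String :=
  String.ofList (evalLoopB (evalBuildB knowledge) s.toList)

-- ===== PRECONDITION & SPEC =====
-- Pre_ excludes knowledge entries with fewer than 2 elements, on which A raises IndexError.
def Pre_evaluate (s : String) (knowledge : List (List String)) : Prop :=
  ∀ p ∈ knowledge, 2 ≤ p.length
instance (s : String) (knowledge : List (List String)) : Decidable (Pre_evaluate s knowledge) := by unfold Pre_evaluate; infer_instance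

def pvWitness_evaluate : String × List (List String) := ("(name)is(age)yrs", [["name", "bob"], ["age", "two"]])

def Spec_evaluate (s : String) (knowledge : List (List String)) (out : String) : Prop := out = evaluate_alt s knowledge
instance (s : String) (knowledge : List (List String)) (out : String) : Decidable (Spec_evaluate s knowledge out) := by unfold Spec_evaluate; infer_instance

-- ===== CLAIM (what is proved, stated in full; the proofs are below) =====
def Claim_equal_evaluate : Prop := ∀ (s : String) (knowledge : List (List String)), Dom_evaluate s knowledge → Pre_evaluate s knowledge → Spec_evaluate s knowledge (evaluate s knowledge)

-- ===== LEMMAS AND PROOFS =====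

theorem evalBuild_eq : ∀ (k : List (List String)) (d : PySem.Dict String String),
    evalBuildA k d = k.foldl (fun d p => d.insert (p.getD 0 "") (p.getD 1 "")) d := by
  intro k; induction k with
  | nil => intro d; rfl
  | cons p rest ih => intro d; simp [evalBuildA, List.foldl, ih]

theorem evalInnerA_eq (t : List Char) :
    evalInnerA t = (t.takeWhile (· ≠ ')'), (t.dropWhile (· ≠ ')')).tail) := by
  induction t with
  | nil => rfl
  | cons c t ih =>
    by_cases h : c = ')' <;> simp [evalInnerA, h, List.takeWhile, List.dropWhile, ih]

theorem evalLoopA_nil (d : PySem.Dict String String) : evalLoopA d [] = [] := by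
  rw [evalLoopA]

theorem evalLoopB_nil (d : PySem.Dict String String) : evalLoopB d [] = [] := by
  rw [evalLoopB]

theorem evalLoopB_cons_ne (d : PySem.Dict String String) (c : Char) (t : List Char)
    (hc : c ≠ '(') : evalLoopB d (c :: t) = c :: evalLoopB d t := by
  match t with
  | [] => rw [evalLoopB]; simp [evalLoopB, hc]
  | x :: t' =>
    rw [evalLoopB, evalLoopB]
    simp only [List.dropWhile_cons, List.takeWhile_cons, hc, decide_not]
    split_ifs <;> simp_all

theorem evalLoop_eq (d : PySem.Dict String String) :
    ∀ (n : Nat) (cs : List Char), cs.length ≤ n → evalLoopA d cs = evalLoopB d cs := by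
  intro n
  induction n with
  | zero =>
    intro cs h
    have : cs = [] := List.eq_nil_of_length_eq_zero (Nat.le_zero.mp h)
    subst this; rw [evalLoopA, evalLoopB_nil]
  | succ n ih =>
    intro cs h
    match cs with
    | [] => rw [evalLoopA, evalLoopB_nil]
    | c :: t =>
      by_cases hc : c = '('
      · subst hc
        rw [evalLoopA, evalLoopB]
        simp only [evalInnerA_eq, List.dropWhile_cons, List.takeWhile_cons, decide_not]
        have hval : ∀ key : String, (if ¬ d.contains key then "?" else d.getD key "?")
            = d.getD key "?" := by
          intro key
          by_cases hk : d.contains key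
          · simp [hk]
          · simp [hk, PySem.Dict.getD_of_not_contains]
        rw [if_neg (by simp)]
        simp only [decide_true, Bool.not_true, Bool.false_eq_true, if_false, List.tail_cons,
          List.isEmpty_cons, hval, List.nil_append]
        by_cases he : (List.dropWhile (fun x => !decide (x = ')')) t).isEmpty
        · have h0 : List.dropWhile (fun x => !decide (x = ')')) t = [] := by
            simpa [List.isEmpty_iff] using he
          simp [h0, evalLoopA_nil]
        · have htail : ((List.dropWhile (fun x => !decide (x = ')')) t).tail).length ≤ n := by
            have h3 := (List.dropWhile_sublist (l := t) (p := fun x => !decide (x = ')'))).length_le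
            have h4 := List.length_tail (l := List.dropWhile (fun x => !decide (x = ')')) t)
            have h5 : t.length + 1 ≤ n + 1 := by simpa using h
            omega
          simp [he, ih _ htail]
      · rw [evalLoopA]
        rw [if_pos (by simp [hc]), evalLoopB_cons_ne d c t hc]
        have ht : t.length ≤ n := by simp at h; omega
        rw [ih t ht]

-- ===== VERDICT (by name: the statement is the Claim_ definition above) =====
theorem evaluate_spec : Claim_equal_evaluate := by
  intro s knowledge _ _
  unfold Spec_evaluate evaluate evaluate_alt evalBuildB
  rw [evalBuild_eq, evalLoop_eq _ s.toList.length _ le_rfl]
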